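-- pv_equiv track=rewrite | github.com/Vusal-Layijov/daily_ds-a | python/summingSquares.py | acmTeam
-- ===== SOURCE A (Python) =====
-- def acmTeam(topic):
--
--     n=len(topic)
--     mySet=set()
--
--     for num in range(1,n):
--         for num2 in range(num+1,n+1):
--             mySet.add((num,num2))
--     myArr=list(mySet)
--     myArr.sort()
--     res=[0]*len(myArr)
--     i=0
--     for pair in myArr:
--         sumM=0
--         for ind in range(len(topic[pair[0]-1])):
--             if topic[pair[0]-1][ind]=="1" or topic[pair[1]-1][ind]=="1":
--                 sumM+=1
--         res[i]=sumM
--         i+=1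
--     res2=[]
--     num=max(res)
--     res2.append(num)
--     res2.append(res.count(num))
--     return res2
-- ===== SOURCE B (Python) =====
-- def acmTeam(topic):
--     # Encode each member's topic string as a bitmask once; then a pair's
--     # score is one popcount of the OR of the two masks.
--     masks = []
--     for s in topic:
--         m = 0
--         for c in reversed(s):
--             m = 2 * m + (1 if c == "1" else 0)
--         masks.append(m)
--     best = -1
--     count = 0
--     n = len(masks)
--     for i in range(n):
--         for j in range(i + 1, n):
--             v = (masks[i] | masks[j]).bit_count()
--             if v > best:
--                 best, count = v, 1
--             elif v == best:
--                 count += 1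
--     return [best, count]
-- ===== Notes on version B (the rewrite author's own statement) =====
-- stated objective: faster
-- what changed: B encodes each topic string as an integer bitmask once and scores every pair with a single popcount of the OR of the two masks while keeping a running max and count, instead of A's per-pair character-by-character scan over a set-built, sorted pair list.
-- intended difference: On lists where some later string is longer than an earlier one and carries a '1' beyond the earlier string's length, A scans only the earlier string's length and so undercounts that pair (e.g. A returns [1, 1] on ['1', '01']), while B counts the full OR of both strings ([2, 1]), which is the intended number of topics known by at least one of the two. — e.g. on acmTeam(["1", "01"]): A returns [1, 1], B returns [2, 1]
-- outside the precondition, e.g. on acmTeam([]): A raises ValueError, B returns [-1, 0]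
import Mathlib
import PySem

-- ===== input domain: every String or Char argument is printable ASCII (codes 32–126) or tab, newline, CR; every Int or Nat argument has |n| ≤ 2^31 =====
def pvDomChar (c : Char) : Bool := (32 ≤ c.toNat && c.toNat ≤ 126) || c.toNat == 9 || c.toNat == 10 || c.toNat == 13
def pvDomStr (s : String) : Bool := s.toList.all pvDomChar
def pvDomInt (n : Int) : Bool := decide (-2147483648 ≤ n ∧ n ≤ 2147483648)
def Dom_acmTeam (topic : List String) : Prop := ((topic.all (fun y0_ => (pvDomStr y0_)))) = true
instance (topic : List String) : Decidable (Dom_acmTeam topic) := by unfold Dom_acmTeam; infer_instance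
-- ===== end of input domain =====

-- B bitmasks each string once and scores each pair with one popcount of the OR of the
-- masks (faster); on pairs whose later string is longer and has a '1' past the earlier
-- string's end, A undercounts and B returns the intended full count (see D_acmTeam).

-- ===== PORT A =====
def acmTeam (topic : List String) : List Int :=
  let n : Int := topic.length
  let mySet : PySem.Set (Int × Int) :=
    (PySem.List.pyRange 1 n 1).foldl (fun s num =>
      (PySem.List.pyRange (num + 1) (n + 1) 1).foldl
        (fun s num2 => PySem.Set.add s (num, num2)) s) PySem.Set.empty
  let myArr : List (Int × Int) := PySem.List.sorted2 mySet (fun p => p.1) (fun p => p.2)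
  -- res = [0]*len(myArr); res[i] = sumM; i += 1  (i stays ≥ 0, so .toNat is exact)
  let st := myArr.foldl (fun (st : List Int × Int) pair =>
      let s := (PySem.List.pyGet? topic (pair.1 - 1)).getD ""   -- index always in range here
      let t := (PySem.List.pyGet? topic (pair.2 - 1)).getD ""
      let sumM : Int := (PySem.List.pyRange 0 (PySem.Str.len s) 1).foldl (fun sumM ind =>
          if (PySem.Str.pyGet? s ind == some '1') || (PySem.Str.pyGet? t ind == some '1')
          then sumM + 1 else sumM) 0
      (st.1.set st.2.toNat sumM, st.2 + 1)) (List.replicate myArr.length 0, 0)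
  match PySem.List.max? st.1 (fun x => x) with
  | some num => [num, (PySem.List.count st.1 num : Int)]
  | none => []   -- max() raises ValueError on an empty list: excluded by Pre_ (len(topic) ≥ 2)

-- ===== PORT B =====
def acmTeam_alt (topic : List String) : List Int :=
  let masks : List Int := topic.foldl (fun acc s =>
      acc ++ [s.toList.reverse.foldl (fun m c => 2 * m + (if c == '1' then 1 else 0)) 0]) []
  let n : Int := topic.length
  let st := (PySem.List.pyRange 0 n 1).foldl (fun st i =>
      (PySem.List.pyRange (i + 1) n 1).foldl (fun st j =>
          let v : Int := (PySem.Int.bitCount (PySem.Int.bor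
              ((PySem.List.pyGet? masks i).getD 0) ((PySem.List.pyGet? masks j).getD 0)) : Nat)
          if v > st.1 then (v, 1) else if v = st.1 then (st.1, st.2 + 1) else st) st)
    ((-1 : Int), (0 : Int))
  [st.1, st.2]

-- ===== PRECONDITION & SPEC =====
-- Pre_ is exactly where the Python A returns: with fewer than 2 strings max([]) raises
-- ValueError, and for a pair i<j where the later string is shorter and the earlier one has a
-- character other than '1' at a position past the later string's end, A raises IndexError.
def Pre_acmTeam (topic : List String) : Prop :=
  2 ≤ topic.length ∧
  List.Pairwise (fun s t => ∀ k : Nat, k < s.toList.length → t.toList.length ≤ k →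
    s.toList[k]? = some '1') topic
instance (topic : List String) : Decidable (Pre_acmTeam topic) := by
  unfold Pre_acmTeam; infer_instance
def pvWitness_acmTeam : List String := ["10110", "00111"]

-- On lists where some later string is longer than an earlier one and has a '1' at a position
-- past the earlier string's end, A scans only the earlier string's length and undercounts
-- that pair, while B counts the full OR of both strings — the intended number of topics
-- known by at least one of the two.
def D_acmTeam (topic : List String) : Prop :=
  ∃ i < topic.length, ∃ j < topic.length, i < j ∧
    ∃ k < ((topic[j]?.getD "").toList.length),
      ((topic[i]?.getD "").toList.length ≤ k ∧ (topic[j]?.getD "").toList[k]? = some '1')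
instance (topic : List String) : Decidable (D_acmTeam topic) := by
  unfold D_acmTeam; infer_instance

def Spec_acmTeam (topic : List String) (out : List Int) : Prop := ¬ D_acmTeam topic → out = acmTeam_alt topic
instance (topic : List String) (out : List Int) : Decidable (Spec_acmTeam topic out) := by unfold Spec_acmTeam; infer_instance

def pvDiffWitness_acmTeam : List String := ["1", "01"]
def pvDiffWitnessOut_acmTeam : (List Int) × (List Int) := ([1, 1], [2, 1])

-- ===== CLAIM (what is proved, stated in full; the proofs are below) =====
def Claim_unchanged_acmTeam : Prop := ∀ (topic : List String), Dom_acmTeam topic → Pre_acmTeam topic → Spec_acmTeam topic (acmTeam topic)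
def Claim_changed_acmTeam : Prop := Dom_acmTeam (pvDiffWitness_acmTeam) ∧ Pre_acmTeam (pvDiffWitness_acmTeam) ∧ D_acmTeam (pvDiffWitness_acmTeam) ∧ acmTeam (pvDiffWitness_acmTeam) = pvDiffWitnessOut_acmTeam.1 ∧ acmTeam_alt (pvDiffWitness_acmTeam) = pvDiffWitnessOut_acmTeam.2 ∧ pvDiffWitnessOut_acmTeam.1 ≠ pvDiffWitnessOut_acmTeam.2

-- ===== LEMMAS AND PROOFS =====

def pvCnt : List Char → List Char → Nat
  | [], _ => 0
  | c :: cs, [] => (if c = '1' then 1 else 0) + pvCnt cs []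
  | c :: cs, d :: ds => (if c = '1' ∨ d = '1' then 1 else 0) + pvCnt cs ds

def pvMask (cs : List Char) : Nat := cs.foldr (fun c m => 2 * m + (if c = '1' then 1 else 0)) 0

theorem pv_lor_bit (b1 b2 : Bool) (m n : Nat) :
    (2 * m + b1.toNat) ||| (2 * n + b2.toNat) = 2 * (m ||| n) + (b1 || b2).toNat := by
  have := Nat.bitwise_bit (f := or) (a := b1) (m := m) (b := b2) (n := n)
  simpa [Nat.bit_val, HOr.hOr, OrOp.or, Nat.lor, Nat.mul_comm] using this

theorem pv_bitCount_bit (b : Bool) (m : Nat) :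
    PySem.Int.bitCount ((2 * m + b.toNat : Nat) : Int) = b.toNat + PySem.Int.bitCount (m : Nat) := by
  rcases Nat.eq_zero_or_pos (2 * m + b.toNat) with h | h
  · have hm : m = 0 := by omega
    have hb : b.toNat = 0 := by omega
    simp [hm, hb, PySem.Int.bitCount_zero]
  · rw [PySem.Int.bitCount_natCast h]
    have h2 : (2 * m + b.toNat) % 2 = b.toNat := by cases b <;> simp <;> omega
    have h3 : (2 * m + b.toNat) / 2 = m := by cases b <;> simp <;> omega
    rw [h2, h3]

theorem pv_mask_cons (c : Char) (cs : List Char) :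
    pvMask (c :: cs) = 2 * pvMask cs + (decide (c = '1')).toNat := by
  by_cases h : c = '1' <;> simp [pvMask, h]

theorem pv_land_bit (b1 b2 : Bool) (m n : Nat) :
    (2 * m + b1.toNat) &&& (2 * n + b2.toNat) = 2 * (m &&& n) + (b1 && b2).toNat := by
  have := Nat.bitwise_bit (f := and) (a := b1) (m := m) (b := b2) (n := n)
  simpa [Nat.bit_val, HAnd.hAnd, AndOp.and, Nat.land, Nat.mul_comm] using this

theorem pv_core (cs ds : List Char) :
    (pvCnt cs ds : Int) =
      (PySem.Int.bitCount (((pvMask cs ||| pvMask ds) &&& (2 ^ cs.length - 1) : Nat) : Int) : Nat) := by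
  induction cs generalizing ds with
  | nil => simp [pvCnt, pvMask, PySem.Int.bitCount_zero]
  | cons c cs ih =>
    have hpow : (2 : Nat) ^ (c :: cs).length - 1 = 2 * (2 ^ cs.length - 1) + (true : Bool).toNat := by
      have : 1 ≤ (2:Nat) ^ cs.length := Nat.one_le_two_pow
      simp [List.length_cons, pow_succ]; omega
    cases ds with
    | nil =>
      have hm0 : pvMask ([] : List Char) = 2 * 0 + (false : Bool).toNat := by simp [pvMask]
      rw [pv_mask_cons, hpow, hm0, pv_lor_bit, pv_land_bit, pv_bitCount_bit]
      have h0 : pvMask ([] : List Char) = 0 := rfl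
      have := ih ([] : List Char)
      rw [h0, Nat.or_zero] at this
      rw [Nat.or_zero]
      by_cases h : c = '1' <;> simp [pvCnt, h, this]
    | cons d ds =>
      rw [pv_mask_cons, pv_mask_cons, hpow, pv_lor_bit, pv_land_bit, pv_bitCount_bit]
      have := ih ds
      by_cases hc : c = '1' <;> by_cases hd : d = '1' <;>
        simp [pvCnt, hc, hd, this]

theorem pv_mask_zero (ds : List Char) (h : ∀ k : Nat, ds[k]? ≠ some '1') : pvMask ds = 0 := by
  induction ds with
  | nil => rfl
  | cons d ds ih =>
    rw [pv_mask_cons]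
    have hd : ¬ d = '1' := fun hc => (h 0) (by simp [hc])
    rw [ih (fun k => by simpa using h (k + 1))]
    simp [hd]

-- the per-pair values agree when the second string has no '1' past the first string's end
theorem pv_core2 (cs ds : List Char) (h : ∀ k : Nat, cs.length ≤ k → ds[k]? ≠ some '1') :
    (pvCnt cs ds : Int) =
      (PySem.Int.bitCount ((pvMask cs ||| pvMask ds : Nat) : Int) : Nat) := by
  induction cs generalizing ds with
  | nil =>
    rw [pv_mask_zero ds (fun k => h k (Nat.zero_le k))]
    simp [pvCnt, pvMask, PySem.Int.bitCount_zero]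
  | cons c cs ih =>
    cases ds with
    | nil =>
      have hm0 : pvMask ([] : List Char) = 2 * 0 + (false : Bool).toNat := by simp [pvMask]
      rw [pv_mask_cons, hm0, pv_lor_bit, pv_bitCount_bit]
      have := ih ([] : List Char) (fun k _ => by simp)
      have h0 : pvMask ([] : List Char) = 0 := rfl
      rw [h0, Nat.or_zero] at this
      rw [Nat.or_zero]
      by_cases h1 : c = '1' <;> simp [pvCnt, h1, this]
    | cons d ds =>
      rw [pv_mask_cons, pv_mask_cons, pv_lor_bit, pv_bitCount_bit]
      have hds : ∀ k : Nat, cs.length ≤ k → ds[k]? ≠ some '1' := by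
        intro k hk
        simpa using h (k + 1) (by simpa using Nat.succ_le_succ hk)
      have := ih ds hds
      by_cases hc : c = '1' <;> by_cases hd : d = '1' <;>
        simp [pvCnt, hc, hd, this]

-- ===== list / range infrastructure =====

theorem pv_pyRange_shift (a b c : Int) :
    PySem.List.pyRange (a + c) (b + c) 1 = (PySem.List.pyRange a b 1).map (· + c) := by
  rw [PySem.List.pyRange_one, PySem.List.pyRange_one, List.map_map]
  have h : b + c - (a + c) = b - a := by ring
  rw [h]
  congr 1
  funext k
  simp; ring

theorem pv_maskInt (cs : List Char) :
    cs.foldr (fun c (m : Int) => 2 * m + (if c == '1' then 1 else 0)) 0 = ((pvMask cs : Nat) : Int) := by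
  induction cs with
  | nil => simp [pvMask]
  | cons c cs ih =>
    rw [List.foldr_cons, ih, pv_mask_cons]
    by_cases h : c = '1' <;> simp [h] <;> push_cast <;> ring

theorem pv_rangecount (cs ds : List Char) :
    (List.range cs.length).countP (fun k => (cs[k]? == some '1') || (ds[k]? == some '1')) = pvCnt cs ds := by
  induction cs generalizing ds with
  | nil => simp [pvCnt]
  | cons c cs ih =>
    rw [List.length_cons, List.range_succ_eq_map, List.countP_cons, List.countP_map]
    cases ds with
    | nil =>
      have : (fun k => (((c :: cs)[k]? == some '1') || (([] : List Char)[k]? == some '1')) : Nat → Bool) ∘ Nat.succ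
          = fun k => ((cs[k]? == some '1') || (([] : List Char)[k]? == some '1')) := by
        funext k; simp
      rw [this, ih]
      by_cases h : c = '1' <;> simp [pvCnt, h, Nat.add_comm]
    | cons d ds =>
      have : (fun k => (((c :: cs)[k]? == some '1') || ((d :: ds)[k]? == some '1')) : Nat → Bool) ∘ Nat.succ
          = fun k => ((cs[k]? == some '1') || (ds[k]? == some '1')) := by
        funext k; simp
      rw [this, ih]
      by_cases hc : c = '1' <;> by_cases hd : d = '1' <;> simp [pvCnt, hc, hd, Nat.add_comm]

theorem pv_sumM (s t : String) :
    (PySem.List.pyRange 0 (PySem.Str.len s) 1).foldl (fun sumM ind =>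
        if (PySem.Str.pyGet? s ind == some '1') || (PySem.Str.pyGet? t ind == some '1')
        then sumM + 1 else sumM) (0 : Int)
      = (pvCnt s.toList t.toList : Int) := by
  rw [PySem.List.foldl_if_add_one, PySem.Str.len_eq, PySem.List.pyRange_one]
  rw [List.countP_map]
  have h1 : ((s.toList.length : Int) - 0).toNat = s.toList.length := by omega
  rw [h1]
  have h2 : ((fun ind => ((PySem.Str.pyGet? s ind == some '1') || (PySem.Str.pyGet? t ind == some '1'))) ∘ fun (k : Nat) => (0 : Int) + k)
      = fun k => ((s.toList[k]? == some '1') || (t.toList[k]? == some '1')) := by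
    funext k; simp
  rw [h2, pv_rangecount]
  simp

def pvPairs (n : Int) : List (Int × Int) :=
  (PySem.List.pyRange 1 n 1).flatMap (fun i => (PySem.List.pyRange (i + 1) (n + 1) 1).map (fun j => (i, j)))

def pvPairs0 (n : Int) : List (Int × Int) :=
  (PySem.List.pyRange 0 n 1).flatMap (fun i => (PySem.List.pyRange (i + 1) n 1).map (fun j => (i, j)))

theorem pv_inner_set (num : Int) (ys : List Int) :
    ∀ (s : List (Int × Int)), ys.Nodup → (∀ p ∈ s, p.1 = num → p.2 ∉ ys) →
    ys.foldl (fun s n2 => PySem.Set.add s (num, n2)) s = s ++ ys.map (fun j => (num, j)) := by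
  induction ys with
  | nil => intro s _ _; simp
  | cons y ys ih =>
    intro s hnd h
    have hmem : (num, y) ∉ s := fun hin => (h _ hin rfl) (List.mem_cons_self)
    have hadd : PySem.Set.add s (num, y) = s ++ [(num, y)] := by
      simp [PySem.Set.add, PySem.Set.contains]
      intro hc
      exact absurd hc hmem
    rw [List.foldl_cons, hadd, ih (s ++ [(num, y)]) (List.Nodup.of_cons hnd)]
    · simp
    · intro p hp hp1
      rcases List.mem_append.1 hp with hp | hp
      · exact fun h2 => (h p hp hp1) (List.mem_cons_of_mem _ h2)
      · have : p = (num, y) := by simpa using hp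
        subst this
        exact (List.nodup_cons.1 hnd).1

theorem pv_outer_set (n : Int) :
    ∀ (k : Nat) (a : Int) (acc : List (Int × Int)), (n - a).toNat = k →
    (∀ p ∈ acc, p.1 < a) →
    (PySem.List.pyRange a n 1).foldl (fun s num =>
        (PySem.List.pyRange (num + 1) (n + 1) 1).foldl (fun s num2 => PySem.Set.add s (num, num2)) s) acc
      = acc ++ (PySem.List.pyRange a n 1).flatMap (fun i => (PySem.List.pyRange (i + 1) (n + 1) 1).map (fun j => (i, j))) := by
  intro k
  induction k with
  | zero =>
    intro a acc hk _
    rw [PySem.List.pyRange_one_eq_nil (by omega)]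
    simp
  | succ k ih =>
    intro a acc hk hacc
    have ha : a < n := by omega
    rw [PySem.List.pyRange_one_cons ha, List.foldl_cons, List.flatMap_cons]
    rw [pv_inner_set a _ acc (PySem.List.nodup_pyRange_one _ _)
      (fun p hp hp1 => absurd hp1 (by have := hacc p hp; omega))]
    rw [ih (a + 1) _ (by omega)]
    · simp
    · intro p hp
      rcases List.mem_append.1 hp with hp | hp
      · have := hacc p hp; omega
      · rcases List.mem_map.1 hp with ⟨j, _, rfl⟩
        omega

theorem pv_foldl_insertBy {α : Type} (before : α → α → Bool) :
    ∀ (L acc : List α), (∀ x ∈ L, ∀ y ∈ acc, before x y = false) →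
    L.Pairwise (fun a b => before b a = false) →
    L.foldl (fun acc x => PySem.List.insertBy before x acc) acc = acc ++ L := by
  intro L
  induction L with
  | nil => intro acc _ _; simp
  | cons x L ih =>
    intro acc h hpw
    rw [List.foldl_cons, PySem.List.insertBy_of_forall_not_before _ _ _ (h x List.mem_cons_self)]
    rw [ih (acc ++ [x])]
    · simp
    · intro z hz y hy
      rcases List.mem_append.1 hy with hy | hy
      · exact h z (List.mem_cons_of_mem _ hz) y hy
      · have : y = x := by simpa using hy
        subst this
        exact (List.pairwise_cons.1 hpw).1 z hz
    · exact (List.pairwise_cons.1 hpw).2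

theorem pv_pairs_pairwise (n : Int) :
    ∀ (k : Nat) (a : Int), (n - a).toNat = k →
    ((PySem.List.pyRange a n 1).flatMap (fun i => (PySem.List.pyRange (i + 1) (n + 1) 1).map (fun j => (i, j)))).Pairwise
      (fun p q : Int × Int => p.1 < q.1 ∨ (p.1 = q.1 ∧ p.2 < q.2)) := by
  intro k
  induction k with
  | zero =>
    intro a hk
    rw [PySem.List.pyRange_one_eq_nil (by omega)]
    simp
  | succ k ih =>
    intro a hk
    have ha : a < n := by omega
    rw [PySem.List.pyRange_one_cons ha, List.flatMap_cons, List.pairwise_append]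
    refine ⟨?_, ih (a + 1) (by omega), ?_⟩
    · rw [List.pairwise_map]
      exact (PySem.List.pairwise_lt_pyRange_one _ _).imp (fun h => Or.inr ⟨rfl, h⟩)
    · intro p hp q hq
      rcases List.mem_map.1 hp with ⟨j, _, rfl⟩
      rcases List.mem_flatMap.1 hq with ⟨i, hi, hq2⟩
      rcases List.mem_map.1 hq2 with ⟨j2, _, rfl⟩
      have := (PySem.List.mem_pyRange_one.1 hi).1
      left; simpa using by omega

theorem pv_sorted2_pairs (n : Int) :
    PySem.List.sorted2 (pvPairs n) (fun p => p.1) (fun p => p.2) = pvPairs n := by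
  have hpw := pv_pairs_pairwise n (n - 1).toNat 1 rfl
  show (pvPairs n).foldl (fun acc x => PySem.List.insertBy _ x acc) [] = pvPairs n
  rw [pv_foldl_insertBy _ (pvPairs n) [] (by simp)]
  · simp
  · refine hpw.imp ?_
    intro a b hab
    rcases hab with h | ⟨h1, h2⟩ <;> (simp; omega)

theorem pv_pairs_shift (n : Int) (hn : 1 ≤ n) :
    pvPairs n = (pvPairs0 n).map (fun p => (p.1 + 1, p.2 + 1)) := by
  unfold pvPairs pvPairs0
  rw [List.map_flatMap]
  have hsplit : PySem.List.pyRange 0 n 1 = PySem.List.pyRange 0 (n - 1) 1 ++ [n - 1] := by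
    have h1 := PySem.List.pyRange_one_append 0 (n - 1) n (by omega) (by omega)
    have h2 : PySem.List.pyRange (n - 1) n 1 = [n - 1] := by
      have h3 := PySem.List.pyRange_one_singleton (n - 1)
      rw [show n - 1 + 1 = n by ring] at h3
      exact h3
    rw [h1, h2]
  rw [hsplit, List.flatMap_append]
  have hlast : List.flatMap (fun i => ((PySem.List.pyRange (i + 1) n 1).map (fun j => (i, j))).map
      (fun p => (p.1 + 1, p.2 + 1))) [n - 1] = [] := by
    simp [PySem.List.pyRange_one_eq_nil le_rfl]
  rw [hlast, List.append_nil]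
  have houter : PySem.List.pyRange 1 n 1 = (PySem.List.pyRange 0 (n - 1) 1).map (· + 1) := by
    have : PySem.List.pyRange 1 n 1 = PySem.List.pyRange (0 + 1) ((n - 1) + 1) 1 := by norm_num
    rw [this, pv_pyRange_shift]
  rw [houter, List.flatMap_map]
  congr 1
  funext i
  have hinner : PySem.List.pyRange (i + 1 + 1) (n + 1) 1 = (PySem.List.pyRange (i + 1) n 1).map (· + 1) := by
    rw [← pv_pyRange_shift (i + 1) n 1]
  rw [hinner, List.map_map, List.map_map]
  rfl

theorem pv_resfold (g : (Int × Int) → Int) :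
    ∀ (l : List (Int × Int)) (pre q : List Int), q.length = l.length →
    l.foldl (fun (st : List Int × Int) p => (st.1.set st.2.toNat (g p), st.2 + 1)) (pre ++ q, (pre.length : Int))
      = (pre ++ l.map g, (pre.length : Int) + l.length) := by
  intro l
  induction l with
  | nil =>
    intro pre q hq
    rw [List.length_eq_zero_iff.1 hq]
    simp
  | cons p l ih =>
    intro pre q hq
    cases q with
    | nil => simp at hq
    | cons qh qt =>
      rw [List.foldl_cons]
      have h1 : ((pre.length : Int)).toNat = pre.length := by omega
      have h2 : (pre ++ qh :: qt).set pre.length (g p) = (pre ++ [g p]) ++ qt := by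
        rw [List.set_append]
        simp
      have h3 : (pre.length : Int) + 1 = (((pre ++ [g p]).length : Nat) : Int) := by
        simp
      rw [h1, h2, h3, ih (pre ++ [g p]) qt (by simpa using hq)]
      simp
      push_cast
      ring

theorem pv_step (vs : List Int) :
    ∀ (b c : Int),
    vs.foldl (fun (st : Int × Int) v => if v > st.1 then (v, (1 : Int)) else if v = st.1 then (st.1, st.2 + 1) else st) (b, c)
      = (vs.foldl max b, (if vs.foldl max b = b then c else 0) + (vs.count (vs.foldl max b) : Int)) := by
  induction vs with
  | nil => intro b c; simp
  | cons v vs ih =>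
    intro b c
    rw [List.foldl_cons, List.foldl_cons]
    have hle := (PySem.List.le_foldl_max vs (max b v)).1
    by_cases h1 : v > b
    · rw [if_pos h1, ih]
      have hbv : max b v = v := by omega
      rw [hbv] at hle ⊢
      have hM : vs.foldl max v ≠ b := by omega
      have hMv : v = vs.foldl max v ↔ vs.foldl max v = v := by constructor <;> omega
      rw [List.count_cons]
      simp only [if_neg hM]
      by_cases h2 : vs.foldl max v = v <;> simp [h2, beq_iff_eq] <;> push_cast <;> omega
    · rw [if_neg h1]
      by_cases h2 : v = b
      · rw [if_pos h2, ih]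
        have hbv : max b v = b := by omega
        rw [hbv] at hle ⊢
        rw [List.count_cons]
        by_cases h3 : vs.foldl max b = b <;> simp [h2, h3, beq_iff_eq] <;> push_cast <;> omega
      · rw [if_neg h2, ih]
        have hbv : max b v = b := by omega
        rw [hbv] at hle ⊢
        have hvM : v ≠ vs.foldl max b := by omega
        rw [List.count_cons]
        simp [hvM, beq_iff_eq]

def pvV (topic : List String) (i j : Int) : Int :=
  (PySem.Int.bitCount (((pvMask ((PySem.List.pyGet? topic i).getD "").toList |||
      pvMask ((PySem.List.pyGet? topic j).getD "").toList) &&&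
      (2 ^ ((PySem.List.pyGet? topic i).getD "").toList.length - 1) : Nat) : Int) : Nat)

def pvVB (topic : List String) (i j : Int) : Int :=
  (PySem.Int.bitCount ((pvMask ((PySem.List.pyGet? topic i).getD "").toList |||
      pvMask ((PySem.List.pyGet? topic j).getD "").toList : Nat) : Int) : Nat)

def pvVals (topic : List String) : List Int :=
  (pvPairs0 (topic.length : Int)).map (fun p => pvV topic p.1 p.2)

def pvValsB (topic : List String) : List Int :=
  (pvPairs0 (topic.length : Int)).map (fun p => pvVB topic p.1 p.2)

def pvOut (vals : List Int) : List Int :=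
  match PySem.List.max? vals (fun x => x) with
  | some num => [num, (PySem.List.count vals num : Int)]
  | none => []

theorem pv_resfold' (g : (Int × Int) → Int) (l : List (Int × Int)) :
    l.foldl (fun (st : List Int × Int) p => (st.1.set st.2.toNat (g p), st.2 + 1)) (List.replicate l.length 0, 0)
      = (l.map g, (l.length : Int)) := by
  have h := pv_resfold g l [] (List.replicate l.length 0) (by simp)
  simpa using h

theorem pv_A (topic : List String) (h2 : 2 ≤ topic.length) : acmTeam topic = pvOut (pvVals topic) := by
  unfold acmTeam
  dsimp only []
  rw [pv_outer_set (topic.length : Int) ((topic.length : Int) - 1).toNat 1 PySem.Set.empty rfl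
    (by intro p hp; simp [PySem.Set.empty] at hp)]
  have hempty : (PySem.Set.empty : List (Int × Int)) = [] := rfl
  rw [hempty, List.nil_append]
  have hP : (PySem.List.pyRange 1 (topic.length : Int) 1).flatMap
      (fun i => (PySem.List.pyRange (i + 1) ((topic.length : Int) + 1) 1).map (fun j => (i, j)))
      = pvPairs (topic.length : Int) := rfl
  rw [hP, pv_sorted2_pairs, pv_resfold']
  have hmap : (pvPairs (topic.length : Int)).map (fun pair =>
      (PySem.List.pyRange 0 (PySem.Str.len ((PySem.List.pyGet? topic (pair.1 - 1)).getD "")) 1).foldl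
        (fun sumM ind =>
          if (PySem.Str.pyGet? ((PySem.List.pyGet? topic (pair.1 - 1)).getD "") ind == some '1')
             || (PySem.Str.pyGet? ((PySem.List.pyGet? topic (pair.2 - 1)).getD "") ind == some '1')
          then sumM + 1 else sumM) 0) = pvVals topic := by
    have hstep : ∀ p : Int × Int, (PySem.List.pyRange 0 (PySem.Str.len ((PySem.List.pyGet? topic (p.1 - 1)).getD "")) 1).foldl
        (fun sumM ind =>
          if (PySem.Str.pyGet? ((PySem.List.pyGet? topic (p.1 - 1)).getD "") ind == some '1')
             || (PySem.Str.pyGet? ((PySem.List.pyGet? topic (p.2 - 1)).getD "") ind == some '1')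
          then sumM + 1 else sumM) 0 = pvV topic (p.1 - 1) (p.2 - 1) := by
      intro p
      rw [pv_sumM, pv_core]
      rfl
    rw [List.map_congr_left (fun p _ => hstep p)]
    rw [pv_pairs_shift _ (by omega), List.map_map]
    unfold pvVals
    apply List.map_congr_left
    intro p _
    simp
  rw [hmap]
  rfl

theorem pv_B (topic : List String) (h2 : 2 ≤ topic.length) : acmTeam_alt topic = pvOut (pvValsB topic) := by
  unfold acmTeam_alt
  dsimp only []
  rw [PySem.List.foldl_append_singleton_eq_map, List.nil_append]
  -- replace the per-pair value by pvVB on the members of the ranges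
  rw [PySem.List.foldl_congr_mem (PySem.List.pyRange 0 (topic.length : Int) 1) _
    (fun (st : Int × Int) i => (PySem.List.pyRange (i + 1) (topic.length : Int) 1).foldl
      (fun (st : Int × Int) j => if pvVB topic i j > st.1 then (pvVB topic i j, (1 : Int))
        else if pvVB topic i j = st.1 then (st.1, st.2 + 1) else st) st) _ ?_]
  · -- fold over the flattened pair list
    have houter : (fun (st : Int × Int) i => (PySem.List.pyRange (i + 1) (topic.length : Int) 1).foldl
        (fun (st : Int × Int) j => if pvVB topic i j > st.1 then (pvVB topic i j, (1 : Int))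
          else if pvVB topic i j = st.1 then (st.1, st.2 + 1) else st) st)
        = (fun (st : Int × Int) i => ((PySem.List.pyRange (i + 1) (topic.length : Int) 1).map (fun j => pvVB topic i j)).foldl
          (fun (st : Int × Int) v => if v > st.1 then (v, (1 : Int)) else if v = st.1 then (st.1, st.2 + 1) else st) st) := by
      funext st i
      rw [List.foldl_map]
    rw [houter, ← List.foldl_flatMap]
    have hflat : (PySem.List.pyRange 0 (topic.length : Int) 1).flatMap
        (fun i => (PySem.List.pyRange (i + 1) (topic.length : Int) 1).map (fun j => pvVB topic i j))
        = pvValsB topic := by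
      unfold pvValsB pvPairs0
      rw [List.map_flatMap]
      apply List.flatMap_congr
      intro i _
      rw [List.map_map]
      rfl
    rw [hflat, pv_step]
    have hne : pvValsB topic ≠ [] := by
      unfold pvValsB
      simp only [ne_eq, List.map_eq_nil_iff]
      intro hnil
      have : ((0 : Int), (1 : Int)) ∈ pvPairs0 (topic.length : Int) := by
        unfold pvPairs0
        refine List.mem_flatMap.2 ⟨0, PySem.List.mem_pyRange_one.2 ⟨le_refl _, by omega⟩, ?_⟩
        exact List.mem_map.2 ⟨1, PySem.List.mem_pyRange_one.2 ⟨by omega, by omega⟩, rfl⟩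
      rw [hnil] at this
      simp at this
    obtain ⟨v, rest, hvr⟩ := List.exists_cons_of_ne_nil hne
    rw [hvr]
    have hv0 : 0 ≤ v := by
      have : v ∈ pvValsB topic := by rw [hvr]; exact List.mem_cons_self
      unfold pvValsB at this
      rcases List.mem_map.1 this with ⟨p, _, rfl⟩
      unfold pvVB
      positivity
    rw [List.foldl_cons]
    have hmax : max (-1 : Int) v = v := by omega
    rw [hmax]
    unfold pvOut
    rw [PySem.List.max?_id_cons]
    simp [PySem.List.count_eq]
  · -- the congruence: on in-range i, j the computed value is pvVB topic i j
    intro st i hi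
    have hi' := PySem.List.mem_pyRange_one.1 hi
    apply PySem.List.foldl_congr_mem
    intro st' j hj
    have hj' := PySem.List.mem_pyRange_one.1 hj
    have hval : ((PySem.Int.bitCount (PySem.Int.bor
        ((PySem.List.pyGet? (topic.map (fun s => s.toList.reverse.foldl
            (fun m c => 2 * m + (if c == '1' then 1 else 0)) 0)) i).getD 0)
          ((PySem.List.pyGet? (topic.map (fun s => s.toList.reverse.foldl
            (fun m c => 2 * m + (if c == '1' then 1 else 0)) 0)) j).getD 0)) : Nat) : Int)
        = pvVB topic i j := by
      have hlookup : ∀ t : Int, 0 ≤ t → t < (topic.length : Int) →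
          (PySem.List.pyGet? (topic.map (fun s => s.toList.reverse.foldl
            (fun m c => 2 * m + (if c == '1' then 1 else 0)) 0)) t).getD 0
          = ((pvMask ((PySem.List.pyGet? topic t).getD "").toList : Nat) : Int) := by
        intro t ht0 htn
        rw [PySem.List.pyGet?_of_nonneg _ ht0, PySem.List.pyGet?_of_nonneg _ ht0]
        have htlt : t.toNat < topic.length := by omega
        rw [List.getElem?_map, List.getElem?_eq_getElem htlt]
        simp only [Option.map_some, Option.getD_some]
        rw [List.foldl_reverse]
        exact pv_maskInt _
      rw [hlookup i hi'.1 hi'.2, hlookup j (by omega) hj'.2]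
      rw [PySem.Int.bor_natCast]
      rfl
    rw [hval]

-- outside D_, A's per-pair value equals B's per-pair value, so the whole outputs agree
theorem pv_vals_eq (topic : List String) (hnd : ¬ D_acmTeam topic) :
    pvVals topic = pvValsB topic := by
  unfold pvVals pvValsB
  apply List.map_congr_left
  intro p hp
  unfold pvPairs0 at hp
  rcases List.mem_flatMap.1 hp with ⟨i, hi, hp2⟩
  rcases List.mem_map.1 hp2 with ⟨j, hj, rfl⟩
  have hi' := PySem.List.mem_pyRange_one.1 hi
  have hj' := PySem.List.mem_pyRange_one.1 hj
  have hiN : i.toNat < topic.length := by omega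
  have hjN : j.toNat < topic.length := by omega
  have hcs : (PySem.List.pyGet? topic i).getD "" = topic[i.toNat] := by
    rw [PySem.List.pyGet?_of_nonneg _ hi'.1, List.getElem?_eq_getElem hiN]
    rfl
  have hds : (PySem.List.pyGet? topic j).getD "" = topic[j.toNat] := by
    rw [PySem.List.pyGet?_of_nonneg _ (by omega), List.getElem?_eq_getElem hjN]
    rfl
  have hno1 : ∀ k : Nat, (topic[i.toNat]).toList.length ≤ k → (topic[j.toNat]).toList[k]? ≠ some '1' := by
    intro k hk hc
    have hklt : k < (topic[j.toNat]).toList.length := (List.getElem?_eq_some_iff.1 hc).1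
    apply hnd
    refine ⟨i.toNat, hiN, j.toNat, hjN, by omega, k, ?_, ?_, ?_⟩ <;>
      simp only [List.getElem?_eq_getElem hiN, List.getElem?_eq_getElem hjN, Option.getD_some]
    · exact hklt
    · exact hk
    · exact hc
  have hmaskLt : pvMask (topic[i.toNat]).toList < 2 ^ (topic[i.toNat]).toList.length := by
    generalize (topic[i.toNat]).toList = cs
    induction cs with
    | nil => simp [pvMask]
    | cons c cs ih =>
      rw [pv_mask_cons, List.length_cons, pow_succ]
      rcases Bool.toNat_le (decide (c = '1')) with h
      omega
  show pvV topic i j = pvVB topic i j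
  unfold pvV pvVB
  rw [hcs, hds]
  have h1 := pv_core (topic[i.toNat]).toList (topic[j.toNat]).toList
  have h2 := pv_core2 (topic[i.toNat]).toList (topic[j.toNat]).toList hno1
  have := h1.symm.trans h2
  exact_mod_cast this

-- ===== VERDICT (by name: the statement is the Claim_ definition above) =====
theorem acmTeam_spec : Claim_unchanged_acmTeam := by
  intro topic _ hpre
  unfold Spec_acmTeam
  intro hnd
  rw [pv_A topic hpre.1, pv_B topic hpre.1, pv_vals_eq topic hnd]

theorem acmTeam_changed : Claim_changed_acmTeam := by
  unfold Claim_changed_acmTeam; decide
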